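-- pv_equiv track=rewrite | github.com/souzamarcelo/course-prog-python | 3-exercicios/src/6-matrizes/zeros.py | colunas_zeradas
-- ===== SOURCE A (Python) =====
-- def colunas_zeradas(matriz):
--     qtd = 0
--     for col in range(len(matriz[0])):
--         zerada = True
--         for lin in range(len(matriz)):
--             if matriz[lin][col] != 0:
--                 zerada = False
--                 break
--         if zerada: qtd += 1
--     return qtd
-- ===== SOURCE B (Python) =====
-- def colunas_zeradas(matriz):
--     ncols = len(matriz[0])
--     cand = [True] * ncols
--     for row in matriz:
--         for col in range(ncols):
--             if row[col] != 0:
--                 cand[col] = False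
--     return sum(cand)
-- ===== Notes on version B (the rewrite author's own statement) =====
-- stated objective: alternative
-- what changed: Replaces A's column-major scan with early break per column by a single row-major pass maintaining a per-column boolean candidate array, summed at the end.
-- outside the precondition, e.g. on colunas_zeradas([[1, 2], [3]]): A returns 0, B raises IndexError
import Mathlib
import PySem

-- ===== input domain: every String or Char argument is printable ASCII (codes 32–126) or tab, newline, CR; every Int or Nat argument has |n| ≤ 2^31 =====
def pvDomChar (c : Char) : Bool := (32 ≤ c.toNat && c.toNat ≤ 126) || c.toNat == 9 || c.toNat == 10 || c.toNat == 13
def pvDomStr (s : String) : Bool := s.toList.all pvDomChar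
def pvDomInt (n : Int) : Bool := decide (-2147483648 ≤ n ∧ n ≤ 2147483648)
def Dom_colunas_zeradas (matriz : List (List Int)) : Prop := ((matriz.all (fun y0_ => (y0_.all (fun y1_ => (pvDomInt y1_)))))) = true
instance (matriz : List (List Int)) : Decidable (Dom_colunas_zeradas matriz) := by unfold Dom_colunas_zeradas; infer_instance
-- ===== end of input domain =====

-- B replaces A's column-major scan (early break per column) by a single row-major pass maintaining a per-column boolean array; same cost, different decomposition.


-- ===== PORT A =====
-- inner 'for lin in range(len(matriz))' with break: structural recursion over the rows
def pvZeradaLoop (rows : List (List Int)) (col : Int) : Bool :=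
  match rows with
  | [] => true
  | row :: rest => if PySem.List.pyGetD row col 0 ≠ 0 then false else pvZeradaLoop rest col

def colunas_zeradas (matriz : List (List Int)) : Int :=
  (PySem.List.pyRange 0 (PySem.List.len (PySem.List.pyGetD matriz 0 [])) 1).foldl
    (fun qtd col => if pvZeradaLoop matriz col then qtd + 1 else qtd) 0

-- ===== PORT B =====
def colunas_zeradas_alt (matriz : List (List Int)) : Int :=
  let ncols : Nat := (PySem.List.pyGetD matriz 0 []).length
  let cand : List Bool := List.replicate ncols true
  let cand := matriz.foldl
    (fun cand row =>
      (PySem.List.pyRange 0 (ncols : Int) 1).foldl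
        (fun cand col =>
          if PySem.List.pyGetD row col 0 ≠ 0 then PySem.List.pySetD cand col false else cand)
        cand)
    cand
  ((cand.count true : Nat) : Int)   -- sum(cand) over booleans = number of True entries

-- ===== PRECONDITION & SPEC =====
-- Pre_ excludes inputs where Python A raises IndexError (empty matrix; a row shorter than row 0
-- reached by the scan). It also excludes some ragged matrices on which A's early break happens to
-- return before reaching the short row (see cite), since B's full row-major pass raises there.
def Pre_colunas_zeradas (matriz : List (List Int)) : Prop :=
  matriz ≠ [] ∧ ∀ row ∈ matriz, (matriz.headD []).length ≤ row.length
instance (matriz : List (List Int)) : Decidable (Pre_colunas_zeradas matriz) := by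
  unfold Pre_colunas_zeradas; infer_instance

def pvWitness_colunas_zeradas : List (List Int) := [[0, 1], [0, 0]]

def Spec_colunas_zeradas (matriz : List (List Int)) (out : Int) : Prop := out = colunas_zeradas_alt matriz
instance (matriz : List (List Int)) (out : Int) : Decidable (Spec_colunas_zeradas matriz out) := by unfold Spec_colunas_zeradas; infer_instance

-- ===== CLAIM (what is proved, stated in full; the proofs are below) =====
def Claim_equal_colunas_zeradas : Prop := ∀ (matriz : List (List Int)), Dom_colunas_zeradas matriz → Pre_colunas_zeradas matriz → Spec_colunas_zeradas matriz (colunas_zeradas matriz)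

-- ===== LEMMAS AND PROOFS =====

-- A's inner loop is the 'all rows zero at this column' test
theorem pvZeradaLoop_eq_all (rows : List (List Int)) (col : Int) :
    pvZeradaLoop rows col = rows.all (fun row => PySem.List.pyGetD row col 0 == 0) := by
  induction rows with
  | nil => rfl
  | cons row rest ih =>
      by_cases h : PySem.List.pyGetD row col 0 = 0 <;> simp [pvZeradaLoop, h, ih]

-- B's inner fold keeps the candidate array's length
theorem pvStep_length (row : List Int) (n : Nat) (cand : List Bool) :
    ((PySem.List.pyRange 0 (n : Int) 1).foldl
        (fun cand col =>
          if PySem.List.pyGetD row col 0 ≠ 0 then PySem.List.pySetD cand col false else cand)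
        cand).length = cand.length := by
  induction n generalizing cand with
  | zero => simp
  | succ m ih =>
      have hsplit : PySem.List.pyRange 0 ((m + 1 : Nat) : Int) 1
          = PySem.List.pyRange 0 (m : Int) 1 ++ [(m : Int)] := by
        have h := PySem.List.pyRange_one_succ_right (a := 0) (b := (m : Int)) (by positivity)
        push_cast
        exact h
      rw [hsplit, List.foldl_append]
      simp only [List.foldl_cons, List.foldl_nil]
      split
      · rw [PySem.List.length_pySetD, ih]
      · rw [ih]

-- pointwise effect of B's inner fold (one row) on the candidate array
theorem pvStep_getElem? (row : List Int) (n : Nat) (cand : List Bool) (i : Nat) :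
    ((PySem.List.pyRange 0 (n : Int) 1).foldl
        (fun cand col =>
          if PySem.List.pyGetD row col 0 ≠ 0 then PySem.List.pySetD cand col false else cand)
        cand)[i]?
      = if i < n ∧ PySem.List.pyGetD row (i : Int) 0 ≠ 0 then (cand[i]?.map fun _ => false)
        else cand[i]? := by
  induction n generalizing cand with
  | zero => simp
  | succ m ih =>
      have hsplit : PySem.List.pyRange 0 ((m + 1 : Nat) : Int) 1
          = PySem.List.pyRange 0 (m : Int) 1 ++ [(m : Int)] := by
        have h := PySem.List.pyRange_one_succ_right (a := 0) (b := (m : Int)) (by positivity)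
        push_cast
        exact h
      rw [hsplit, List.foldl_append]
      simp only [List.foldl_cons, List.foldl_nil]
      by_cases hm : PySem.List.pyGetD row (m : Int) 0 = 0
      · rw [if_neg (by simpa using hm), ih]
        by_cases hi : i < m
        · simp [hi, Nat.lt_succ_of_lt hi]
        · by_cases him : i = m
          · replace hm : row[m]?.getD 0 = 0 := by simpa using hm
            subst him; simp [hm]
          · have h1 : ¬ i < m + 1 := by omega
            simp [hi, h1]
      · rw [if_pos (by simpa using hm), PySem.List.pySetD_natCast, List.getElem?_set, ih]
        replace hm : ¬ row[m]?.getD 0 = 0 := by simpa using hm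
        by_cases him : m = i
        · subst him
          rw [pvStep_length]
          by_cases hlen : m < cand.length
          · simp [hlen, hm]
          · simp [hlen, hm]
        · by_cases hi : i < m
          · simp [him, hi, Nat.lt_succ_of_lt hi]
          · have h1 : ¬ i < m + 1 := by omega
            simp [him, hi, h1]

-- B's inner fold maps a range-shaped candidate array pointwise
theorem pvStep_map (row : List Int) (n : Nat) (f : Nat → Bool) :
    ((PySem.List.pyRange 0 (n : Int) 1).foldl
        (fun cand col =>
          if PySem.List.pyGetD row col 0 ≠ 0 then PySem.List.pySetD cand col false else cand)
        ((List.range n).map f))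
      = (List.range n).map (fun i => f i && (PySem.List.pyGetD row (i : Int) 0 == 0)) := by
  apply List.ext_getElem?
  intro i
  rw [pvStep_getElem?]
  by_cases hi : i < n
  · by_cases hz : PySem.List.pyGetD row (i : Int) 0 = 0
    · replace hz : row[i]?.getD 0 = 0 := by simpa using hz
      simp [hi, hz]
    · replace hz : ¬ row[i]?.getD 0 = 0 := by simpa using hz
      simp [hi, hz]
  · have h1 : (List.range n)[i]? = none := by
      rw [List.getElem?_eq_none]; simpa using Nat.le_of_not_lt hi
    simp [hi]

-- B's outer fold: the candidate array after all rows, pointwise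
theorem pvCand_eq (rows : List (List Int)) (n : Nat) (f : Nat → Bool) :
    rows.foldl
      (fun cand row =>
        (PySem.List.pyRange 0 (n : Int) 1).foldl
          (fun cand col =>
            if PySem.List.pyGetD row col 0 ≠ 0 then PySem.List.pySetD cand col false else cand)
          cand)
      ((List.range n).map f)
    = (List.range n).map
        (fun i => f i && rows.all (fun row => PySem.List.pyGetD row (i : Int) 0 == 0)) := by
  induction rows generalizing f with
  | nil => simp
  | cons row rest ih =>
      simp only [List.foldl_cons, pvStep_map, ih]
      apply List.map_congr_left
      intro i _
      simp [Bool.and_assoc]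

-- ===== VERDICT (by name: the statement is the Claim_ definition above) =====
theorem colunas_zeradas_spec : Claim_equal_colunas_zeradas := by
  intro matriz _ _
  unfold Spec_colunas_zeradas colunas_zeradas colunas_zeradas_alt
  set n : Nat := (PySem.List.pyGetD matriz 0 []).length with hn
  have hrep : (List.replicate n true) = (List.range n).map (fun _ => true) := by
    simp
  rw [PySem.List.len_eq, ← hn,
    PySem.List.foldl_if_add_one (fun col => pvZeradaLoop matriz col)]
  simp only [hrep, pvCand_eq, Bool.true_and, zero_add]
  rw [PySem.List.pyRange_zero_nat]
  rw [List.countP_map, List.count_eq_countP, List.countP_map]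
  congr 2
  funext i
  simp [pvZeradaLoop_eq_all]
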